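-- pv_equiv track=rewrite | github.com/SirMetaladon/railmancer | railmancer/tools.py | merge_grids
-- ===== SOURCE A (Python) =====
-- def merge_grids(center, left, right, up, down, fill_value=True):
--     N = len(center)  # Each sub-grid is N x N
--     merged_size = 3 * N  # Final grid will be 3N x 3N
--
--     # Initialize the full grid with the fill_value
--     merged = [[fill_value] * merged_size for _ in range(merged_size)]
--
--     # Helper function to insert a grid into a position
--     def insert_grid(target, source, x_offset, y_offset):
--         for i in range(N):
--             for j in range(N):
--                 target[x_offset + i][y_offset + j] = source[i][j]
--
--     # Place the 5 known grids into the merged grid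
--     insert_grid(merged, center, N, N)
--     insert_grid(merged, left, 0, N)
--     insert_grid(merged, right, 2 * N, N)
--     insert_grid(merged, down, N, 0)
--     insert_grid(merged, up, N, 2 * N)
--
--     return merged  # The fully merged grid
-- ===== SOURCE B (Python) =====
-- def merge_grids(center, left, right, up, down, fill_value=True):
--     N = len(center)
--     pad = [fill_value] * N
--     top = [pad + left[i] + pad for i in range(N)]
--     middle = [down[i] + center[i] + up[i] for i in range(N)]
--     bottom = [pad + right[i] + pad for i in range(N)]
--     return top + middle + bottom
-- ===== Notes on version B (the rewrite author's own statement) =====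
-- stated objective: simpler
-- what changed: B builds each output row directly by concatenating padding and source rows in three bands (list concatenation/replication) instead of pre-filling a 3Nx3N grid and overwriting it cell by cell with five nested copy loops.
import Mathlib
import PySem

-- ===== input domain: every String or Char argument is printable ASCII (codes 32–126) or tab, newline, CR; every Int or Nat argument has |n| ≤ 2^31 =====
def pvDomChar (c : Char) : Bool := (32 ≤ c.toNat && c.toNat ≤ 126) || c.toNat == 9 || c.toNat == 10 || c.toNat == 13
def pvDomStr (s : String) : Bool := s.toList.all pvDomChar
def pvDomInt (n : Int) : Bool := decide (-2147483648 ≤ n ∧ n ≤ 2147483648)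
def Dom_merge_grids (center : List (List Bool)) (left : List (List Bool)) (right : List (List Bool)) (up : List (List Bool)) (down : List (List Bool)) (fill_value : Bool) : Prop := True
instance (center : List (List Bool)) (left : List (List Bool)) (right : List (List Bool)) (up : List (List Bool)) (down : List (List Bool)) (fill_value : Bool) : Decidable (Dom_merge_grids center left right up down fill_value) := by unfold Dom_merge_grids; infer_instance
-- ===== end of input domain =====

-- B builds each output row directly as the concatenation of three bands instead of
-- pre-filling a 3N×3N grid and overwriting it with five nested copy loops (objective: simpler).

-- ===== PORT A =====
-- Python: insert_grid(target, source, x_offset, y_offset) — nested loops writing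
-- target[x_offset+i][y_offset+j] = source[i][j]; out-of-range reads (excluded by Pre_)
-- would raise in Python, here they read a default.
def pvInsertGrid (N : Nat) (target source : List (List Bool)) (xo yo : Nat) : List (List Bool) :=
  (List.range N).foldl (fun t i =>
    (List.range N).foldl (fun t' j =>
      t'.set (xo + i) ((t'.getD (xo + i) []).set (yo + j) ((source.getD i []).getD j false))) t) target

def merge_grids (center : List (List Bool)) (left : List (List Bool)) (right : List (List Bool)) (up : List (List Bool)) (down : List (List Bool)) (fill_value : Bool) : List (List Bool) :=
  let N := center.length
  let merged_size := 3 * N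
  let merged := (List.range merged_size).map (fun _ => List.replicate merged_size fill_value)
  let m1 := pvInsertGrid N merged center N N
  let m2 := pvInsertGrid N m1 left 0 N
  let m3 := pvInsertGrid N m2 right (2 * N) N
  let m4 := pvInsertGrid N m3 down N 0
  let m5 := pvInsertGrid N m4 up N (2 * N)
  m5

-- ===== PORT B =====
def merge_grids_alt (center : List (List Bool)) (left : List (List Bool)) (right : List (List Bool)) (up : List (List Bool)) (down : List (List Bool)) (fill_value : Bool) : List (List Bool) :=
  let N := center.length
  let pad := List.replicate N fill_value
  ((List.range N).map (fun i => pad ++ left.getD i [] ++ pad)) ++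
  ((List.range N).map (fun i => down.getD i [] ++ center.getD i [] ++ up.getD i [])) ++
  ((List.range N).map (fun i => pad ++ right.getD i [] ++ pad))

-- ===== PRECONDITION & SPEC =====
-- Pre_ excludes undersized grids (fewer than N rows, or a used row shorter than N), on which
-- A raises IndexError, and ragged grids whose used rows are longer than N, which A silently
-- truncates to N columns — a quirk of A's fixed-width copy loop that B does not reproduce.
def Pre_merge_grids (center : List (List Bool)) (left : List (List Bool)) (right : List (List Bool)) (up : List (List Bool)) (down : List (List Bool)) (fill_value : Bool) : Prop :=
  center.length ≤ left.length ∧ center.length ≤ right.length ∧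
  center.length ≤ up.length ∧ center.length ≤ down.length ∧
  (∀ row ∈ center, row.length = center.length) ∧
  (∀ row ∈ left.take center.length, row.length = center.length) ∧
  (∀ row ∈ right.take center.length, row.length = center.length) ∧
  (∀ row ∈ up.take center.length, row.length = center.length) ∧
  (∀ row ∈ down.take center.length, row.length = center.length)
instance (center : List (List Bool)) (left : List (List Bool)) (right : List (List Bool)) (up : List (List Bool)) (down : List (List Bool)) (fill_value : Bool) : Decidable (Pre_merge_grids center left right up down fill_value) := by unfold Pre_merge_grids; infer_instance

def pvWitness_merge_grids : List (List Bool) × List (List Bool) × List (List Bool) × List (List Bool) × List (List Bool) × Bool :=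
  ([[true, false], [false, false]], [[true, true], [false, true]], [[false, false], [true, true]],
   [[true, false], [true, true]], [[false, true], [false, false]], true)

def Spec_merge_grids (center : List (List Bool)) (left : List (List Bool)) (right : List (List Bool)) (up : List (List Bool)) (down : List (List Bool)) (fill_value : Bool) (out : List (List Bool)) : Prop := out = merge_grids_alt center left right up down fill_value
instance (center : List (List Bool)) (left : List (List Bool)) (right : List (List Bool)) (up : List (List Bool)) (down : List (List Bool)) (fill_value : Bool) (out : List (List Bool)) : Decidable (Spec_merge_grids center left right up down fill_value out) := by unfold Spec_merge_grids; infer_instance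

-- ===== CLAIM (what is proved, stated in full; the proofs are below) =====
def Claim_equal_merge_grids : Prop := ∀ (center : List (List Bool)) (left : List (List Bool)) (right : List (List Bool)) (up : List (List Bool)) (down : List (List Bool)) (fill_value : Bool), Dom_merge_grids center left right up down fill_value → Pre_merge_grids center left right up down fill_value → Spec_merge_grids center left right up down fill_value (merge_grids center left right up down fill_value)

-- ===== LEMMAS AND PROOFS =====

-- the inner loop of insert_grid, as a function of the row being overwritten
def pvWr (row src : List Bool) (yo n : Nat) : List Bool :=
  (List.range n).foldl (fun r j => r.set (yo + j) (src.getD j false)) row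

theorem pvWr_length (row src : List Bool) (yo n : Nat) : (pvWr row src yo n).length = row.length := by
  induction n with
  | zero => rfl
  | succ m ih => simp [pvWr, List.range_succ] at ih ⊢; simp [ih]

theorem pvWr_getElem? (row src : List Bool) (yo n c : Nat) :
    (pvWr row src yo n)[c]? =
      if yo ≤ c ∧ c < yo + n ∧ c < row.length then some (src.getD (c - yo) false) else row[c]? := by
  induction n with
  | zero => simp [pvWr]; intros; omega
  | succ m ih =>
      have step : pvWr row src yo (m + 1) = (pvWr row src yo m).set (yo + m) (src.getD m false) := by
        simp [pvWr, List.range_succ]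
      rw [step, List.getElem?_set]
      rw [ih, pvWr_length]
      by_cases h1 : yo + m = c
      · by_cases h2 : c < row.length
        · simp [h1, h2]
          rw [if_pos (by omega)]
          subst h1
          simp
        · simp [h1, h2]
      · simp [h1]
        by_cases h3 : yo ≤ c ∧ c < yo + m ∧ c < row.length
        · simp [h3]; intro; omega
        · rw [if_neg h3, if_neg]; omega

-- inner fold over j = one set of the full row
theorem pvInner_eq (t : List (List Bool)) (src : List Bool) (k yo n : Nat) :
    (List.range n).foldl (fun t' j => t'.set k ((t'.getD k []).set (yo + j) (src.getD j false))) t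
      = t.set k (pvWr (t.getD k []) src yo n) := by
  induction n with
  | zero =>
      simp only [pvWr, List.range_zero, List.foldl_nil]
      by_cases hk : k < t.length
      · rw [List.getD_eq_getElem t [] hk, List.set_getElem_self]
      · rw [List.set_eq_of_length_le (by omega)]
  | succ m ih =>
      rw [List.range_succ, List.foldl_append, ih]
      simp only [List.foldl_cons, List.foldl_nil]
      have hw : pvWr (t.getD k []) src yo (m + 1) = (pvWr (t.getD k []) src yo m).set (yo + m) (src.getD m false) := by
        simp [pvWr, List.range_succ]
      by_cases hk : k < t.length
      · have hget : (t.set k (pvWr (t.getD k []) src yo m)).getD k [] = pvWr (t.getD k []) src yo m := by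
          simp [List.getD, hk]
        rw [hget, List.set_set, hw]
      · rw [List.set_eq_of_length_le (le_of_not_gt (by simpa using hk))]
        rw [List.set_eq_of_length_le (le_of_not_gt (by simpa using hk))]
        rw [List.set_eq_of_length_le (le_of_not_gt (by simpa using hk))]

-- generalized outer loop (pvInsertGrid with the outer bound m decoupled)
def pvGo (N : Nat) (s : List (List Bool)) (xo yo m : Nat) (t : List (List Bool)) : List (List Bool) :=
  (List.range m).foldl (fun t i =>
    (List.range N).foldl (fun t' j =>
      t'.set (xo + i) ((t'.getD (xo + i) []).set (yo + j) ((s.getD i []).getD j false))) t) t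

theorem pvInsertGrid_eq_go (N : Nat) (t s : List (List Bool)) (xo yo : Nat) :
    pvInsertGrid N t s xo yo = pvGo N s xo yo N t := rfl

theorem pvGo_succ (N : Nat) (s : List (List Bool)) (xo yo p : Nat) (t : List (List Bool)) :
    pvGo N s xo yo (p + 1) t =
      (pvGo N s xo yo p t).set (xo + p)
        (pvWr ((pvGo N s xo yo p t).getD (xo + p) []) (s.getD p []) yo N) := by
  show (List.range (p + 1)).foldl _ t = _
  rw [List.range_succ, List.foldl_append, List.foldl_cons, List.foldl_nil, pvInner_eq]
  rfl

theorem pvGo_length (N : Nat) (s : List (List Bool)) (xo yo m : Nat) (t : List (List Bool)) :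
    (pvGo N s xo yo m t).length = t.length := by
  induction m with
  | zero => rfl
  | succ p ih => rw [pvGo_succ, List.length_set, ih]

theorem pvGo_getElem? (N : Nat) (s : List (List Bool)) (xo yo m : Nat) (t : List (List Bool)) (r : Nat) :
    (pvGo N s xo yo m t)[r]? =
      if xo ≤ r ∧ r < xo + m ∧ r < t.length then
        some (pvWr (t.getD r []) (s.getD (r - xo) []) yo N)
      else t[r]? := by
  induction m generalizing r with
  | zero =>
      show t[r]? = _
      rw [if_neg (by omega)]
  | succ p ih =>
      rw [pvGo_succ, List.getElem?_set, pvGo_length]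
      have hrow : (pvGo N s xo yo p t).getD (xo + p) [] = t.getD (xo + p) [] := by
        simp only [List.getD, ih (xo + p),
          if_neg (show ¬(xo ≤ xo + p ∧ xo + p < xo + p ∧ xo + p < t.length) by omega)]
      by_cases h1 : xo + p = r
      · subst h1
        rw [if_pos rfl]
        by_cases h2 : xo + p < t.length
        · rw [if_pos h2,
            if_pos (show xo ≤ xo + p ∧ xo + p < xo + (p + 1) ∧ xo + p < t.length from
              ⟨by omega, by omega, h2⟩), hrow,
            show xo + p - xo = p by omega]
        · rw [if_neg h2,
            if_neg (show ¬(xo ≤ xo + p ∧ xo + p < xo + (p + 1) ∧ xo + p < t.length) by omega),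
            List.getElem?_eq_none (by omega)]
      · rw [if_neg h1, ih]
        by_cases h3 : xo ≤ r ∧ r < xo + p ∧ r < t.length
        · rw [if_pos h3, if_pos (by omega)]
        · rw [if_neg h3, if_neg (by omega)]

-- writing src of length n over the middle segment of a ++ q ++ c replaces q by src
theorem pvWr_append (a q c src : List Bool) (n : Nat) (hq : q.length = n) (hs : src.length = n) :
    pvWr (a ++ (q ++ c)) src a.length n = a ++ (src ++ c) := by
  apply List.ext_getElem?
  intro j
  rw [pvWr_getElem?]
  simp only [List.length_append, hq]
  by_cases h1 : j < a.length
  · rw [if_neg (by omega), List.getElem?_append_left h1, List.getElem?_append_left h1]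
  · by_cases h2 : j < a.length + n
    · rw [if_pos ⟨by omega, by omega, by omega⟩,
        List.getElem?_append_right (show a.length ≤ j by omega),
        List.getElem?_append_left (show j - a.length < src.length by omega)]
      have hjs : j - a.length < src.length := by omega
      simp [List.getD, List.getElem?_eq_getElem hjs]
    · rw [if_neg (by omega),
        List.getElem?_append_right (show a.length ≤ j by omega),
        List.getElem?_append_right (show a.length ≤ j by omega),
        List.getElem?_append_right (show q.length ≤ j - a.length by omega),
        List.getElem?_append_right (show src.length ≤ j - a.length by omega),
        hq, hs]

-- ===== VERDICT (by name: the statement is the Claim_ definition above) =====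
theorem merge_grids_spec : Claim_equal_merge_grids := by
  intro center left right up down fill_value _ hPre
  obtain ⟨hl, hr, hu, hd, hc, hcl, hcr, hcu, hcd⟩ := hPre
  unfold Spec_merge_grids
  simp only [merge_grids, merge_grids_alt, pvInsertGrid_eq_go]
  set N := center.length with hN
  set rep := List.replicate (3 * N) fill_value with hrep
  set t0 := List.map (fun _ => rep) (List.range (3 * N)) with ht0
  set m1 := pvGo N center N N N t0 with hm1
  set m2 := pvGo N left 0 N N m1 with hm2
  set m3 := pvGo N right (2 * N) N N m2 with hm3
  set m4 := pvGo N down N 0 N m3 with hm4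
  have len0 : t0.length = 3 * N := by simp [ht0]
  have len1 : m1.length = 3 * N := by rw [hm1, pvGo_length, len0]
  have len2 : m2.length = 3 * N := by rw [hm2, pvGo_length, len1]
  have len3 : m3.length = 3 * N := by rw [hm3, pvGo_length, len2]
  have len4 : m4.length = 3 * N := by rw [hm4, pvGo_length, len3]
  have ht0get : ∀ j, j < 3 * N → t0[j]? = some rep := by
    intro j hj
    rw [ht0]
    simp [hj]
  -- row-content helpers
  have wr_top : ∀ src : List Bool, src.length = N →
      pvWr rep src N N =
        List.replicate N fill_value ++ (src ++ List.replicate N fill_value) := by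
    intro src hsrc
    have h3 : rep = List.replicate N fill_value ++
        (List.replicate N fill_value ++ List.replicate N fill_value) := by
      rw [hrep, show 3 * N = N + (N + N) by omega, List.replicate_add, List.replicate_add]
    rw [h3]
    simpa using pvWr_append (List.replicate N fill_value) (List.replicate N fill_value)
      (List.replicate N fill_value) src N (by simp) hsrc
  have wr_mid : ∀ cR dR uR : List Bool, cR.length = N → dR.length = N → uR.length = N →
      pvWr (pvWr (pvWr rep cR N N) dR 0 N) uR (2 * N) N = dR ++ (cR ++ uR) := by
    intro cR dR uR hc' hd' hu'
    rw [wr_top cR hc']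
    have e2 := pvWr_append ([] : List Bool) (List.replicate N fill_value)
      (cR ++ List.replicate N fill_value) dR N (by simp) hd'
    simp only [List.nil_append, List.length_nil] at e2
    rw [e2]
    have e3 := pvWr_append (dR ++ cR) (List.replicate N fill_value) ([] : List Bool) uR N
      (by simp) hu'
    simp only [List.append_nil, List.append_assoc, List.length_append, hc', hd'] at e3
    rw [show 2 * N = N + N by omega, e3]
  -- used-row lengths
  have hrowlen : ∀ (g : List (List Bool)), N ≤ g.length →
      (∀ row ∈ List.take N g, row.length = N) → ∀ j, j < N → (g.getD j []).length = N := by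
    intro g hg hgr j hj
    have hjg : j < g.length := by omega
    rw [List.getD_eq_getElem g [] hjg]
    have hjt : j < (List.take N g).length := by
      simp [List.length_take]
      omega
    have hmem : (List.take N g)[j]'hjt ∈ List.take N g := List.getElem_mem hjt
    have heq : (List.take N g)[j]'hjt = g[j]'hjg := List.getElem_take
    rw [heq] at hmem
    exact hgr _ hmem
  have hcrow : ∀ j, j < N → (center.getD j []).length = N := by
    intro j hj
    rw [List.getD_eq_getElem center [] (by omega)]
    exact hc _ (List.getElem_mem (by omega))
  apply List.ext_getElem?
  intro r
  by_cases hR : r < 3 * N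
  · have b0 := ht0get r hR
    by_cases h1 : r < N
    · -- top band: only the `left` insertion touches row r
      have b1 : m1[r]? = some rep := by
        rw [hm1, pvGo_getElem?, if_neg (by omega), b0]
      have b2 : m2[r]? = some (pvWr rep (left.getD r []) N N) := by
        rw [hm2, pvGo_getElem?, len1, if_pos ⟨by omega, by omega, by omega⟩,
          List.getD_eq_getElem?_getD, b1, Nat.sub_zero]
        rfl
      have b3 : m3[r]? = m2[r]? := by rw [hm3, pvGo_getElem?, if_neg (by omega)]
      have b4 : m4[r]? = m3[r]? := by rw [hm4, pvGo_getElem?, if_neg (by omega)]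
      rw [pvGo_getElem?, if_neg (by omega), b4, b3, b2,
        wr_top _ (hrowlen left hl hcl r h1),
        List.getElem?_append_left (by simp; omega),
        List.getElem?_append_left (by simp; omega)]
      simp [h1, List.append_assoc]
    · by_cases h2 : r < 2 * N
      · -- middle band: center, then down, then up write row r
        have b1 : m1[r]? = some (pvWr rep (center.getD (r - N) []) N N) := by
          rw [hm1, pvGo_getElem?, len0, if_pos ⟨by omega, by omega, by omega⟩,
            List.getD_eq_getElem?_getD, b0]
          rfl
        have b2 : m2[r]? = m1[r]? := by rw [hm2, pvGo_getElem?, if_neg (by omega)]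
        have b3 : m3[r]? = m2[r]? := by rw [hm3, pvGo_getElem?, if_neg (by omega)]
        have b4 : m4[r]? = some (pvWr (pvWr rep (center.getD (r - N) []) N N)
            (down.getD (r - N) []) 0 N) := by
          rw [hm4, pvGo_getElem?, len3, if_pos ⟨by omega, by omega, by omega⟩,
            List.getD_eq_getElem?_getD, b3, b2, b1]
          rfl
        rw [pvGo_getElem?, len4, if_pos ⟨by omega, by omega, by omega⟩,
          List.getD_eq_getElem?_getD, b4]
        simp only [Option.getD_some]
        rw [wr_mid _ _ _ (hcrow (r - N) (by omega))
          (hrowlen down hd hcd (r - N) (by omega)) (hrowlen up hu hcu (r - N) (by omega))]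
        rw [List.getElem?_append_left (by simp; omega),
          List.getElem?_append_right (by simp; omega)]
        simp [show r - N < N by omega, List.append_assoc]
      · -- bottom band: only the `right` insertion touches row r
        have b1 : m1[r]? = some rep := by
          rw [hm1, pvGo_getElem?, if_neg (by omega), b0]
        have b2 : m2[r]? = m1[r]? := by rw [hm2, pvGo_getElem?, if_neg (by omega)]
        have b3 : m3[r]? = some (pvWr rep (right.getD (r - 2 * N) []) N N) := by
          rw [hm3, pvGo_getElem?, len2, if_pos ⟨by omega, by omega, by omega⟩,
            List.getD_eq_getElem?_getD, b2, b1]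
          rfl
        have b4 : m4[r]? = m3[r]? := by rw [hm4, pvGo_getElem?, if_neg (by omega)]
        rw [pvGo_getElem?, if_neg (by omega), b4, b3,
          wr_top _ (hrowlen right hr hcr (r - 2 * N) (by omega)),
          List.getElem?_append_right (by simp; omega)]
        simp [List.append_assoc, show r - (N + N) = r - 2 * N by omega]
        exact ⟨r - 2 * N, by rw [List.getElem?_range (by omega)], rfl⟩
  · rw [List.getElem?_eq_none (by rw [pvGo_length, len4]; omega),
      List.getElem?_eq_none (by simp; omega)]
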